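-- pv_equiv track=rewrite | github.com/tonder0812/gogoanime | utils/asyncio_downloader.py | calculate_ranges
-- ===== SOURCE A (Python) =====
-- def calculate_ranges(size: int, segments: int):
--     splits: list[int] = []
--     remainder = size % segments
--     integer = size // segments
--     for i in range(segments):
--         splits.append(integer)
--     for i in range(remainder):
--         splits[i] += 1
--     ranges: list[int] = [0]
--     for i in range(segments):
--         ranges.append(ranges[-1] + splits[i])
--     return ranges
-- ===== SOURCE B (Python) =====
-- def calculate_ranges(size: int, segments: int):
--     integer, remainder = divmod(size, segments)
--     return [0] + [i * integer + min(i, remainder) for i in range(1, segments + 1)]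
-- ===== Notes on version B (the rewrite author's own statement) =====
-- stated objective: simpler
-- what changed: Replaces the per-segment splits list and the running-sum loop with a single comprehension using the closed form i*integer + min(i, remainder) for the i-th boundary.
import Mathlib
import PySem

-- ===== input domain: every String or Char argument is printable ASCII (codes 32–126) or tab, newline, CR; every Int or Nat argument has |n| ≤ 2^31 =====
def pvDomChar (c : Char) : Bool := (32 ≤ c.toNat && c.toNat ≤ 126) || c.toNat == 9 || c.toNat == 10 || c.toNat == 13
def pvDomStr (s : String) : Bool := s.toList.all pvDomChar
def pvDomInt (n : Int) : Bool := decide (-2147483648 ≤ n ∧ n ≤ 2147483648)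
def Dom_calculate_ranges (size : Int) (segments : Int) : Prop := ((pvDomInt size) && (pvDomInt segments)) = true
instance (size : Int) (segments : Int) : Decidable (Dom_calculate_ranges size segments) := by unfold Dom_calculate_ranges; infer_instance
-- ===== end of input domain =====

-- B computes each boundary by the closed form i*integer + min(i, remainder); return values only, no mutation is observable.

-- ===== PORT A =====
def calculate_ranges (size : Int) (segments : Int) : List Int :=
  let remainder := PySem.Int.mod size segments
  let integer := PySem.Int.floordiv size segments
  let splits : List Int := (PySem.List.pyRange 0 segments 1).foldl (fun s _ => s ++ [integer]) []
  let splits := (PySem.List.pyRange 0 remainder 1).foldl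
    (fun s i => PySem.List.pySetD s i (PySem.List.pyGetD s i 0 + 1)) splits
  (PySem.List.pyRange 0 segments 1).foldl
    (fun r i => r ++ [PySem.List.pyGetD r (-1) 0 + PySem.List.pyGetD splits i 0]) [0]

-- ===== PORT B =====
def calculate_ranges_alt (size : Int) (segments : Int) : List Int :=
  let integer := PySem.Int.floordiv size segments
  let remainder := PySem.Int.mod size segments
  [0] ++ (PySem.List.pyRange 1 (segments + 1) 1).map (fun i => i * integer + min i remainder)

-- ===== PRECONDITION & SPEC =====
-- Python raises ZeroDivisionError when segments == 0 (size % segments); excluded.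
def Pre_calculate_ranges (size : Int) (segments : Int) : Prop := segments ≠ 0
instance (size : Int) (segments : Int) : Decidable (Pre_calculate_ranges size segments) := by unfold Pre_calculate_ranges; infer_instance
def pvWitness_calculate_ranges : Int × Int := (10, 3)

def Spec_calculate_ranges (size : Int) (segments : Int) (out : List Int) : Prop := out = calculate_ranges_alt size segments
instance (size : Int) (segments : Int) (out : List Int) : Decidable (Spec_calculate_ranges size segments out) := by unfold Spec_calculate_ranges; infer_instance

-- ===== CLAIM (what is proved, stated in full; the proofs are below) =====
def Claim_equal_calculate_ranges : Prop := ∀ (size : Int) (segments : Int), Dom_calculate_ranges size segments → Pre_calculate_ranges size segments → Spec_calculate_ranges size segments (calculate_ranges size segments)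

-- ===== LEMMAS AND PROOFS =====

-- length is preserved by any fold of pySetD updates
theorem foldl_pySetD_length (l : List Int) (f : List Int → Int → Int) :
    ∀ xs : List Int, (l.foldl (fun s i => PySem.List.pySetD s i (f s i)) xs).length = xs.length := by
  induction l with
  | nil => intro xs; rfl
  | cons a l ih =>
      intro xs
      simp only [List.foldl_cons, ih, PySem.List.length_pySetD]

-- the "+1 on the first r slots" loop, read at index i
theorem bump_get (r : Int) (xs : List Int) (hr0 : 0 ≤ r) (hrlen : r ≤ (xs.length : Int))
    (i : Int) (hi0 : 0 ≤ i) (hilen : i < (xs.length : Int)) :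
    PySem.List.pyGetD ((PySem.List.pyRange 0 r 1).foldl
        (fun s j => PySem.List.pySetD s j (PySem.List.pyGetD s j 0 + 1)) xs) i 0
      = PySem.List.pyGetD xs i 0 + (if i < r then 1 else 0) := by
  obtain ⟨m, rfl⟩ : ∃ m : Nat, i = (m : Int) := ⟨i.toNat, (Int.toNat_of_nonneg hi0).symm⟩
  obtain ⟨n, rfl⟩ : ∃ n : Nat, r = (n : Int) := ⟨r.toNat, (Int.toNat_of_nonneg hr0).symm⟩
  clear hr0 hi0
  induction n with
  | zero =>
      simp only [Int.natCast_zero, PySem.List.pyRange_one_eq_nil (le_refl 0), List.foldl_nil]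
      have : ¬ ((m : Int) < 0) := by omega
      simp [this]
  | succ n ih =>
      have hsplit : PySem.List.pyRange 0 ((n : Int) + 1) 1
          = PySem.List.pyRange 0 (n : Int) 1 ++ [(n : Int)] :=
        PySem.List.pyRange_one_succ_right (by omega)
      have hn : ((n : Int)) ≤ (xs.length : Int) := by push_cast at hrlen ⊢; omega
      push_cast
      rw [hsplit, List.foldl_append]
      simp only [List.foldl_cons, List.foldl_nil]
      set prev := (PySem.List.pyRange 0 (n : Int) 1).foldl
        (fun s j => PySem.List.pySetD s j (PySem.List.pyGetD s j 0 + 1)) xs with hprev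
      have hlen : prev.length = xs.length := foldl_pySetD_length _ _ xs
      have hnlt : n < prev.length := by push_cast at hrlen; omega
      rw [PySem.List.pyGetD_pySetD_natCast prev n m _ 0 hnlt]
      by_cases hmn : m = n
      · subst hmn
        rw [ih hn]
        have h1 : ¬ ((m : Int) < (m : Int)) := by omega
        have h2 : ((m : Int) < (m : Int) + 1) := by omega
        simp [h2]
      · rw [if_neg hmn, ih hn]
        have : ((m : Int) < (n : Int)) ↔ ((m : Int) < (n : Int) + 1) := by omega
        simp [this]

-- the cumulative-ranges loop equals the map of any g matching the increments
theorem ranges_loop (splits : List Int) (g : Int → Int)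
    (b : Int) :
    ∀ (a : Int) (init : List Int), a ≤ b →
    (∀ i, a ≤ i → i < b → g i + PySem.List.pyGetD splits i 0 = g (i + 1)) →
    (PySem.List.pyRange a b 1).foldl
        (fun r i => r ++ [PySem.List.pyGetD r (-1) 0 + PySem.List.pyGetD splits i 0])
        (init ++ [g a])
      = init ++ (PySem.List.pyRange a (b + 1) 1).map g := by
  intro a
  induction hn : (b - a).toNat generalizing a with
  | zero =>
      intro init hab _
      have hab' : a = b := by omega
      subst hab'
      rw [PySem.List.pyRange_one_eq_nil (le_refl a), List.foldl_nil,
        PySem.List.pyRange_one_singleton]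
      simp
  | succ n ih =>
      intro init hab hg
      have hlt : a < b := by omega
      rw [PySem.List.pyRange_one_cons hlt, List.foldl_cons]
      have hstep : (init ++ [g a]) ++ [PySem.List.pyGetD (init ++ [g a]) (-1) 0
          + PySem.List.pyGetD splits a 0] = (init ++ [g a]) ++ [g (a + 1)] := by
        rw [PySem.List.pyGetD_neg_one_append_singleton, hg a (le_refl a) hlt]
      rw [hstep]
      rw [ih (a + 1) (by omega) (init ++ [g a]) (by omega)
        (fun i h1 h2 => hg i (by omega) h2)]
      rw [List.append_assoc]
      congr 1
      rw [PySem.List.pyRange_one_cons (show a < b + 1 by omega)]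
      rfl

theorem calc_ranges_eq (size segments : Int) (hs : segments ≠ 0) :
    calculate_ranges size segments = calculate_ranges_alt size segments := by
  rcases lt_or_gt_of_ne hs with hneg | hpos
  · -- segments < 0: both programs return [0]
    have h1 : PySem.List.pyRange 0 segments 1 = [] :=
      PySem.List.pyRange_one_eq_nil (by omega)
    have hmod := PySem.Int.mod_neg_bounds size hneg
    have h2 : PySem.List.pyRange 0 (PySem.Int.mod size segments) 1 = [] :=
      PySem.List.pyRange_one_eq_nil (by omega)
    have h3 : PySem.List.pyRange 1 (segments + 1) 1 = [] :=
      PySem.List.pyRange_one_eq_nil (by omega)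
    simp [calculate_ranges, calculate_ranges_alt, h1, h2, h3]
  · -- segments > 0
    set r := PySem.Int.mod size segments with hrdef
    set q := PySem.Int.floordiv size segments with hqdef
    have hr0 : 0 ≤ r := PySem.Int.mod_nonneg size hpos
    have hrlt : r < segments := PySem.Int.mod_lt size hpos
    -- the initial splits list
    have hsplits0 : (PySem.List.pyRange 0 segments 1).foldl
        (fun s (_ : Int) => s ++ [q]) ([] : List Int)
        = (PySem.List.pyRange 0 segments 1).map (fun _ => q) := by
      rw [PySem.List.foldl_append_singleton_eq_map]
      rfl
    have hlen0 : ((PySem.List.pyRange 0 segments 1).map (fun (_ : Int) => q)).length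
        = (segments - 0).toNat := by
      rw [List.length_map, PySem.List.length_pyRange_one]
    -- after bump, indexed reads
    set splits := (PySem.List.pyRange 0 r 1).foldl
      (fun s i => PySem.List.pySetD s i (PySem.List.pyGetD s i 0 + 1))
      ((PySem.List.pyRange 0 segments 1).map (fun _ => q)) with hsdef
    have hget : ∀ i, 0 ≤ i → i < segments →
        PySem.List.pyGetD splits i 0 = q + (if i < r then 1 else 0) := by
      intro i hi0 hilt
      rw [hsdef, bump_get r _ hr0 (by rw [hlen0]; omega) i hi0 (by rw [hlen0]; omega)]
      rw [PySem.List.pyGetD_map_pyRange_of_nonneg _ segments i 0 hi0 hilt]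
    -- the boundary function
    have hmain := ranges_loop splits (fun i => i * q + min i r) segments 0 []
      (by omega)
      (by
        intro i h1 h2
        simp only
        rw [hget i h1 h2]
        have : min (i + 1) r - min i r = (if i < r then 1 else 0) := by
          by_cases h : i < r
          · simp only [min_eq_left (by omega : i ≤ r), min_eq_left (by omega : i + 1 ≤ r), if_pos h]
            ring
          · simp [min_eq_right (by omega : r ≤ i), min_eq_right (by omega : r ≤ i + 1), if_neg h]
        ring_nf
        ring_nf at this
        omega)
    simp only [List.nil_append] at hmain
    have hg0 : (fun i : Int => i * q + min i r) 0 = 0 := by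
      simp [min_eq_left hr0]
    simp only [calculate_ranges, calculate_ranges_alt, ← hrdef, ← hqdef, hsplits0, ← hsdef]
    rw [show ([0] : List Int) = [(fun i : Int => i * q + min i r) 0] by rw [hg0]]
    rw [hmain]
    rw [PySem.List.pyRange_one_cons (show (0:Int) < segments + 1 by omega), List.map_cons]
    simp [min_eq_left hr0]

-- ===== VERDICT (by name: the statement is the Claim_ definition above) =====
theorem calculate_ranges_spec : Claim_equal_calculate_ranges := by
  intro size segments _ hpre
  exact calc_ranges_eq size segments hpre
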